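-- pv_equiv track=rewrite | github.com/mrbartrns/swacademy_structure | programmers/lv3/card_matching.py | match_card
-- ===== SOURCE A (Python) =====
-- def match_card(board):
--     temp = [[] for _ in range(len(board) * len(board) + 1)]
--     ret = []
--     for i in range(len(board)):
--         for j in range(len(board)):
--             if board[i][j] > 0:
--                 idx = board[i][j]
--                 temp[idx].append([i, j])
--     for i in range(len(temp)):
--         if not temp[i]:
--             continue
--         ret.append(temp[i])
--     return ret
-- ===== SOURCE B (Python) =====
-- def match_card(board):
--     n = len(board)
--     values = sorted({board[i][j] for i in range(n) for j in range(n) if board[i][j] > 0})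
--     return [[[i, j] for i in range(n) for j in range(n) if board[i][j] == v] for v in values]
-- ===== Notes on version B (the rewrite author's own statement) =====
-- stated objective: alternative
-- what changed: B does no bucketing at all: it computes the sorted set of card values present and then, for each value, re-scans the board collecting that value's positions, replacing A's (n^2+1)-element bucket array and its 0..n^2 collection scan with staged per-value passes.
import Mathlib
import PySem

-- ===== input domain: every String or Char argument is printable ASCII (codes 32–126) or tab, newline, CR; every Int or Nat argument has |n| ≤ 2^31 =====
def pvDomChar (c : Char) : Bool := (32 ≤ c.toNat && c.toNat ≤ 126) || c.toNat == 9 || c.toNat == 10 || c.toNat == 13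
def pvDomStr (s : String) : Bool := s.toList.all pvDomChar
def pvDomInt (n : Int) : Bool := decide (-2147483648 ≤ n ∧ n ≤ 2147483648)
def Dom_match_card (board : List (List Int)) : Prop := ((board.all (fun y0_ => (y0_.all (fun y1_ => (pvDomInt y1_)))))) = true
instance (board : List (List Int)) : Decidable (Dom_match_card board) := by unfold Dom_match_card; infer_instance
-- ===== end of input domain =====

-- B drops A's bucket array entirely: it computes the sorted set of card values present and
-- then re-scans the board once per value, collecting that value's positions (alternative,
-- not claimed faster).

-- ===== PORT A =====
def match_card (board : List (List Int)) : List (List (List Int)) :=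
  let n : Int := (board.length : Int)
  let temp :=
    (PySem.List.pyRange 0 n 1).foldl (fun temp i =>
      (PySem.List.pyRange 0 n 1).foldl (fun temp j =>
        if PySem.List.pyGetD (PySem.List.pyGetD board i []) j 0 > 0 then
          let idx := PySem.List.pyGetD (PySem.List.pyGetD board i []) j 0
          temp.set idx.toNat (temp.getD idx.toNat [] ++ [[i, j]])
        else temp) temp)
      (List.replicate (board.length * board.length + 1) [])
  (PySem.List.pyRange 0 ((temp.length : Int)) 1).foldl (fun ret i =>
    if PySem.List.pyGetD temp i [] = [] then ret
    else ret ++ [PySem.List.pyGetD temp i []]) []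

-- ===== PORT B =====
def match_card_alt (board : List (List Int)) : List (List (List Int)) :=
  let n : Int := (board.length : Int)
  let values := PySem.List.sorted
    (PySem.Set.ofList ((PySem.List.pyRange 0 n 1).flatMap (fun i =>
      ((PySem.List.pyRange 0 n 1).filter (fun j =>
        decide (PySem.List.pyGetD (PySem.List.pyGetD board i []) j 0 > 0))).map
        (fun j => PySem.List.pyGetD (PySem.List.pyGetD board i []) j 0))))
    (fun k => k) false
  values.map (fun v =>
    (PySem.List.pyRange 0 n 1).flatMap (fun i =>
      ((PySem.List.pyRange 0 n 1).filter (fun j =>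
        decide (PySem.List.pyGetD (PySem.List.pyGetD board i []) j 0 = v))).map
        (fun j => ([i, j] : List Int))))

-- ===== PRECONDITION & SPEC =====
-- Pre_ excludes exactly the inputs where the Python A raises IndexError: a row shorter than
-- len(board) (the column loop runs to len(board)), or a scanned cell value above len(board)**2
-- (A indexes its bucket array with it); A returns normally on everything else.
def Pre_match_card (board : List (List Int)) : Prop :=
  ∀ row ∈ board, board.length ≤ row.length ∧
    ∀ v ∈ row.take board.length, v ≤ ((board.length * board.length : Nat) : Int)
instance (board : List (List Int)) : Decidable (Pre_match_card board) := by
  unfold Pre_match_card; infer_instance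

def pvWitness_match_card : List (List Int) := [[1, 2], [0, 1]]

def Spec_match_card (board : List (List Int)) (out : List (List (List Int))) : Prop :=
  out = match_card_alt board
instance (board : List (List Int)) (out : List (List (List Int))) : Decidable (Spec_match_card board out) := by
  unfold Spec_match_card; infer_instance

-- ===== CLAIM (what is proved, stated in full; the proofs are below) =====
def Claim_equal_match_card : Prop :=
  ∀ (board : List (List Int)), Dom_match_card board → Pre_match_card board →
    Spec_match_card board (match_card board)
-- ===== LEMMAS AND PROOFS =====

-- the value of cell (i, j), as both ports read it
def pvVal (board : List (List Int)) (q : Nat × Nat) : Int :=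
  PySem.List.pyGetD (PySem.List.pyGetD board (q.1 : Int) []) (q.2 : Int) 0

def pvPairs (n : Nat) : List (Nat × Nat) :=
  (List.range n).flatMap (fun i => (List.range n).map (fun j => (i, j)))

-- the row-major stream of (value, position) for the positive cells
def pvCells (board : List (List Int)) : List (Int × List Int) :=
  ((pvPairs board.length).filter (fun q => decide (0 < pvVal board q))).map
    (fun q => (pvVal board q, [(q.1 : Int), (q.2 : Int)]))

def pvStepA (temp : List (List (List Int))) (c : Int × List Int) : List (List (List Int)) :=
  temp.set c.1.toNat (temp.getD c.1.toNat [] ++ [c.2])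

def pvTemp (board : List (List Int)) : List (List (List Int)) :=
  (pvCells board).foldl pvStepA (List.replicate (board.length * board.length + 1) [])

-- A's nested scan is a fold over the positive-cell stream
lemma pv_nested_fold {δ : Type} (board : List (List Int)) (f : δ → Int × List Int → δ)
    (init : δ) :
    (PySem.List.pyRange 0 ((board.length : Int)) 1).foldl (fun s i =>
      (PySem.List.pyRange 0 ((board.length : Int)) 1).foldl (fun s j =>
        if PySem.List.pyGetD (PySem.List.pyGetD board i []) j 0 > 0 then
          f s (PySem.List.pyGetD (PySem.List.pyGetD board i []) j 0, [i, j])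
        else s) s) init
    = (pvCells board).foldl f init := by
  unfold pvCells pvPairs
  rw [List.foldl_map, ← PySem.List.foldl_ite_eq_foldl_filter
    (p := fun q : Nat × Nat => 0 < pvVal board q)
    (f := fun s q => f s (pvVal board q, [(q.1 : Int), (q.2 : Int)])), List.foldl_flatMap]
  rw [PySem.List.pyRange_zero_natCast, List.foldl_map]
  refine PySem.List.foldl_congr_mem _ _ _ _ (fun s i _ => ?_)
  rw [List.foldl_map, List.foldl_map]
  rfl

-- generic reshaping: a flatMap of filtered-mapped inner scans is a filtered map of the pair stream
lemma pv_flat_aux {β : Type} (os is : List Nat) (p : Int → Int → Bool) (g : Int → Int → β) :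
    os.flatMap (fun (i : Nat) =>
      ((is.map (fun k : Nat => (k : Int))).filter (fun j => p ((i : Nat) : Int) j)).map
        (fun j => g ((i : Nat) : Int) j))
    = ((os.flatMap (fun i => is.map (fun j => (i, j)))).filter
        (fun q : Nat × Nat => p (q.1 : Int) (q.2 : Int))).map
        (fun q : Nat × Nat => g (q.1 : Int) (q.2 : Int)) := by
  induction os with
  | nil => rfl
  | cons i os ih =>
    rw [List.flatMap_cons, List.flatMap_cons, List.filter_append, List.map_append]
    rw [List.filter_map, List.map_map, List.filter_map, List.map_map, ih]
    rfl

-- B's nested comprehension is a filtered map over the row-major pair stream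
lemma pv_nested_flat {β : Type} (board : List (List Int)) (p : Int → Int → Bool)
    (g : Int → Int → β) :
    (PySem.List.pyRange 0 ((board.length : Int)) 1).flatMap (fun i =>
      ((PySem.List.pyRange 0 ((board.length : Int)) 1).filter (fun j => p i j)).map
        (fun j => g i j))
    = ((pvPairs board.length).filter (fun q => p (q.1 : Int) (q.2 : Int))).map
        (fun q => g (q.1 : Int) (q.2 : Int)) := by
  unfold pvPairs
  rw [PySem.List.pyRange_zero_natCast, List.flatMap_map]
  exact pv_flat_aux (List.range board.length) (List.range board.length) p g

lemma pv_bucket_length (cells : List (Int × List Int)) (temp : List (List (List Int))) :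
    (cells.foldl pvStepA temp).length = temp.length := by
  induction cells generalizing temp with
  | nil => rfl
  | cons c cs ih => simp [List.foldl_cons, ih, pvStepA]

lemma pv_bucket_getD (cells : List (Int × List Int)) (temp : List (List (List Int)))
    (h : ∀ c ∈ cells, 0 < c.1 ∧ c.1.toNat < temp.length) (k : Nat) :
    (cells.foldl pvStepA temp).getD k [] =
      temp.getD k [] ++ (cells.filter (fun c => c.1 == (k : Int))).map (fun c => c.2) := by
  induction cells generalizing temp with
  | nil => simp
  | cons c cs ih =>
    obtain ⟨hpos, hlt⟩ := h c (by simp)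
    rw [List.foldl_cons, ih _ (fun c' hc' => by
      have := h c' (by simp [hc']); simpa [pvStepA] using this)]
    by_cases hk : c.1 = (k : Int)
    · have hkn : c.1.toNat = k := by omega
      have h1 : (pvStepA temp c).getD k [] = temp.getD k [] ++ [c.2] := by
        unfold pvStepA
        rw [hkn]
        simp only [List.getD, List.getElem?_set_self (show k < temp.length by omega)]
        simp
      rw [h1, List.filter_cons, if_pos (by simpa using hk)]
      simp
    · have hkn : c.1.toNat ≠ k := by omega
      have h1 : (pvStepA temp c).getD k [] = temp.getD k [] := by
        unfold pvStepA
        simp only [List.getD, List.getElem?_set_ne hkn]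
      rw [h1, List.filter_cons, if_neg (by simpa using hk)]

lemma pv_out_loop (temp : List (List (List Int))) :
    (PySem.List.pyRange 0 ((temp.length : Int)) 1).foldl (fun ret i =>
      if PySem.List.pyGetD temp i [] = [] then ret
      else ret ++ [PySem.List.pyGetD temp i []]) []
    = ((List.range temp.length).filter (fun k => decide ¬(temp.getD k [] = []))).map
        (fun k => temp.getD k []) := by
  rw [PySem.List.pyRange_zero_natCast, List.foldl_map]
  simp only [PySem.List.pyGetD_natCast]
  have hstep : ∀ (ret : List (List (List Int))) (k : Nat),
      (if temp.getD k [] = [] then ret else ret ++ [temp.getD k []])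
      = (if ¬(temp.getD k [] = []) then ret ++ [temp.getD k []] else ret) := by
    intro ret k
    by_cases h : temp.getD k [] = []
    · rw [if_pos h, if_neg (not_not_intro h)]
    · rw [if_neg h, if_pos h]
  simp only [hstep]
  rw [PySem.List.foldl_append_ite (p := fun k => ¬(temp.getD k [] = []))
    (f := fun k => temp.getD k [])]
  simp

-- the two sorted key lists coincide when every present value lies in 1..L-1
lemma pv_keylist (vals : List Int) (L : Nat) (hv : ∀ v ∈ vals, 0 < v ∧ v < (L : Int)) :
    PySem.List.sorted (PySem.Set.ofList vals) (fun k => k) false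
    = ((List.range L).filter (fun (k : Nat) => decide ((k : Int) ∈ vals))).map (fun (k : Nat) => (k : Int)) := by
  apply PySem.List.eq_of_perm_of_pairwise_le_of_injective (key := fun k : Int => k)
    (fun a b h => h)
  · apply (List.perm_ext_iff_of_nodup ?_ ?_).mpr
    · intro x
      rw [(PySem.List.sorted_perm (PySem.Set.ofList vals) (fun k => k) false).mem_iff,
        PySem.Set.mem_ofList]
      simp only [List.mem_map, List.mem_filter, List.mem_range, decide_eq_true_eq]
      constructor
      · intro hx
        have h0 := hv x hx
        refine ⟨x.toNat, ⟨by omega, ?_⟩, by omega⟩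
        rwa [Int.toNat_of_nonneg (by omega)]
      · rintro ⟨k, ⟨_, hk⟩, rfl⟩; exact hk
    · exact ((PySem.List.sorted_perm _ _ _).nodup_iff).mpr (PySem.Set.nodup_ofList vals)
    · exact ((List.nodup_range).filter _).map (fun a b h => by exact_mod_cast h)
  · exact PySem.List.sorted_pairwise _ _
  · refine List.Pairwise.map _ (fun a b h => ?_) ((List.pairwise_lt_range).filter _)
    exact_mod_cast Nat.le_of_lt h

lemma pv_A_eq (board : List (List Int)) :
    match_card board
    = ((List.range (board.length * board.length + 1)).filter
        (fun k => decide ¬((pvTemp board).getD k [] = []))).map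
        (fun k => (pvTemp board).getD k []) := by
  have hlen : (pvTemp board).length = board.length * board.length + 1 := by
    unfold pvTemp; rw [pv_bucket_length]; simp
  have htemp : (PySem.List.pyRange 0 ((board.length : Int)) 1).foldl (fun temp i =>
      (PySem.List.pyRange 0 ((board.length : Int)) 1).foldl (fun temp j =>
        if PySem.List.pyGetD (PySem.List.pyGetD board i []) j 0 > 0 then
          let idx := PySem.List.pyGetD (PySem.List.pyGetD board i []) j 0
          temp.set idx.toNat (temp.getD idx.toNat [] ++ [[i, j]])
        else temp) temp)
      (List.replicate (board.length * board.length + 1) []) = pvTemp board :=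
    pv_nested_fold board pvStepA _
  simp only [match_card]
  rw [htemp, pv_out_loop (pvTemp board), hlen]

lemma pv_B_eq (board : List (List Int)) :
    match_card_alt board
    = (PySem.List.sorted (PySem.Set.ofList ((pvCells board).map (fun c => c.1)))
        (fun k => k) false).map (fun v =>
        ((pvPairs board.length).filter
          (fun q => decide (pvVal board q = v))).map
          (fun q => ([(q.1 : Int), (q.2 : Int)] : List Int))) := by
  have hvals : (PySem.List.pyRange 0 ((board.length : Int)) 1).flatMap (fun i =>
      ((PySem.List.pyRange 0 ((board.length : Int)) 1).filter (fun j =>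
        decide (PySem.List.pyGetD (PySem.List.pyGetD board i []) j 0 > 0))).map
        (fun j => PySem.List.pyGetD (PySem.List.pyGetD board i []) j 0))
      = (pvCells board).map (fun c => c.1) := by
    rw [pv_nested_flat board
      (fun i j => decide (PySem.List.pyGetD (PySem.List.pyGetD board i []) j 0 > 0))
      (fun i j => PySem.List.pyGetD (PySem.List.pyGetD board i []) j 0)]
    unfold pvCells
    rw [List.map_map]
    rfl
  simp only [match_card_alt]
  rw [hvals]
  refine List.map_congr_left (fun v _ => ?_)
  rw [pv_nested_flat board
    (fun i j => decide (PySem.List.pyGetD (PySem.List.pyGetD board i []) j 0 = v))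
    (fun i j => ([i, j] : List Int))]
  rfl

lemma pv_cells_bound (board : List (List Int)) (hpre : Pre_match_card board) :
    ∀ c ∈ pvCells board, 0 < c.1 ∧ c.1 < ((board.length * board.length + 1 : Nat) : Int) := by
  intro c hc
  unfold pvCells at hc
  obtain ⟨q, hq, rfl⟩ := List.mem_map.mp hc
  obtain ⟨hqp, hpos⟩ := List.mem_filter.mp hq
  refine ⟨by simpa using hpos, ?_⟩
  have hq1 : q.1 < board.length ∧ q.2 < board.length := by
    unfold pvPairs at hqp
    obtain ⟨i, hi, hj⟩ := List.mem_flatMap.mp hqp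
    obtain ⟨j, hjm, rfl⟩ := List.mem_map.mp hj
    exact ⟨List.mem_range.mp hi, List.mem_range.mp hjm⟩
  set row := board.getD q.1 [] with hrow
  have hrmem : row ∈ board := by
    rw [hrow, List.getD_eq_getElem board [] hq1.1]; exact List.getElem_mem _
  obtain ⟨hlenr, hvals⟩ := hpre row hrmem
  have hval : pvVal board q = row.getD q.2 0 := by
    unfold pvVal
    rw [PySem.List.pyGetD_natCast, PySem.List.pyGetD_natCast]
  have hj2 : q.2 < row.length := lt_of_lt_of_le hq1.2 hlenr
  have hmem : row.getD q.2 0 ∈ row.take board.length := by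
    rw [List.getD_eq_getElem row 0 hj2]
    have : (row.take board.length)[q.2]'(by simp [hj2, hq1.2]) = row[q.2] :=
      List.getElem_take
    rw [← this]; exact List.getElem_mem _
  have := hvals _ hmem
  rw [hval]; push_cast at this ⊢; omega

-- ===== VERDICT (by name: the statement is the Claim_ definition above) =====
theorem match_card_spec : Claim_equal_match_card := by
  intro board hdom hpre
  unfold Spec_match_card
  rw [pv_A_eq, pv_B_eq]
  set L := board.length * board.length + 1 with hL
  have hb := pv_cells_bound board hpre
  have hbuck : ∀ k : Nat, (pvTemp board).getD k []
      = ((pvCells board).filter (fun c => c.1 == (k : Int))).map (fun c => c.2) := by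
    intro k
    unfold pvTemp
    rw [pv_bucket_getD _ _ (fun c hc => ⟨(hb c hc).1, by have := hb c hc; simp; omega⟩) k]
    simp
  have hkeys := pv_keylist ((pvCells board).map (fun c => c.1)) L (by
    intro v hv
    obtain ⟨c, hc, rfl⟩ := List.mem_map.mp hv
    exact hb c hc)
  rw [hkeys, List.map_map]
  have hcond : ∀ k ∈ List.range L,
      (decide ¬((pvTemp board).getD k [] = []))
      = decide ((k : Int) ∈ (pvCells board).map (fun c => c.1)) := by
    intro k _
    rw [hbuck k]
    apply decide_eq_decide.mpr
    constructor
    · intro h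
      by_contra hn
      apply h
      rw [List.map_eq_nil_iff, List.filter_eq_nil_iff]
      intro c hc hck
      exact hn (List.mem_map.mpr ⟨c, hc, by simpa using hck⟩)
    · intro hk h
      obtain ⟨c, hc, hck⟩ := List.mem_map.mp hk
      rw [List.map_eq_nil_iff, List.filter_eq_nil_iff] at h
      exact h c hc (by simpa using hck)
  rw [List.filter_congr hcond]
  refine List.map_congr_left (fun k hk => ?_)
  rw [hbuck k]
  have hkmem : (k : Int) ∈ (pvCells board).map (fun c => c.1) := by
    have := List.mem_filter.mp hk
    simpa using this.2
  have hkpos : 0 < (k : Int) := by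
    obtain ⟨c, hc, hck⟩ := List.mem_map.mp hkmem
    have := (hb c hc).1; omega
  unfold pvCells
  rw [List.filter_map, List.map_map, List.filter_filter]
  have hcongr : ∀ q : Nat × Nat,
      ((pvVal board q == (k : Int)) && decide (0 < pvVal board q))
      = decide (pvVal board q = (k : Int)) := by
    intro q
    by_cases h : pvVal board q = (k : Int)
    · have hk' : 0 < k := by exact_mod_cast hkpos
      simp [h, hk']
    · simp [h]
  show List.map (fun q : Nat × Nat => ([(q.1 : Int), (q.2 : Int)] : List Int))
      ((pvPairs board.length).filter
        (fun q => (pvVal board q == (k : Int)) && decide (0 < pvVal board q)))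
    = List.map (fun q : Nat × Nat => ([(q.1 : Int), (q.2 : Int)] : List Int))
      ((pvPairs board.length).filter (fun q => decide (pvVal board q = (k : Int))))
  exact congrArg _ (List.filter_congr (fun q _ => hcongr q))
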